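-- pv_equiv track=rewrite | github.com/ani7ganguly/Python-Exercise-Project | Python Exercise/Exercise_Method_and_Functions.py | summer_69
-- ===== SOURCE A (Python) =====
-- def summer_69(nums):
--     total = 0
--     add = True
--
--     for i in nums:
--         while add:
--             if i != 6:
--                 total = total + i
--                 break
--             else:
--                 add = False
--         while add == False:
--             if i != 9:
--                 break
--             else:
--                 add = True
--                 break
--     return total
-- ===== SOURCE B (Python) =====
-- def summer_69(nums):
--     if 6 not in nums:
--         return sum(nums)
--     i = nums.index(6)
--     rest = nums[i + 1:]
--     if 9 not in rest:
--         return sum(nums[:i])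
--     j = rest.index(9)
--     return sum(nums[:i]) + summer_69(rest[j + 1:])
-- ===== Notes on version B (the rewrite author's own statement) =====
-- stated objective: alternative
-- what changed: Replaced the single streaming boolean-state pass with a locate-and-slice divide-and-conquer: find the first 6, sum the prefix, skip to the first following 9, recurse on the remainder.
import Mathlib
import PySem

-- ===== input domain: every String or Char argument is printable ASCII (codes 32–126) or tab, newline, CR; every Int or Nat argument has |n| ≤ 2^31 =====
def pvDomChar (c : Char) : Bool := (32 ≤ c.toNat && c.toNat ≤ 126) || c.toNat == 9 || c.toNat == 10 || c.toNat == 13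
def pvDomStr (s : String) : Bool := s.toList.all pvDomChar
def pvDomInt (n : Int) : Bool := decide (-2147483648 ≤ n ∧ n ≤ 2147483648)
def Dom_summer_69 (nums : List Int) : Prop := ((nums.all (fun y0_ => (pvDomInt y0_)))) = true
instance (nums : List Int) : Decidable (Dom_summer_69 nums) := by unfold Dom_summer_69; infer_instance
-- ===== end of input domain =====

-- B replaces A's single streaming boolean-state pass with a locate-and-slice
-- divide-and-conquer (find the first 6, sum the prefix, skip to the first following 9,
-- recurse on the remainder); objective: alternative decomposition, same cost.

-- ===== PORT A =====
-- step of A's for-loop: the two inner while-loops on state (total, add)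
def pvStepA (st : Int × Bool) (i : Int) : Int × Bool :=
  -- while add: if i != 6 then total += i; break else add = False
  let st1 := if st.2 then (if i ≠ 6 then (st.1 + i, st.2) else (st.1, false)) else st
  -- while add == False: if i != 9 then break else add = True; break
  if st1.2 = false then (if i ≠ 9 then st1 else (st1.1, true)) else st1

def summer_69 (nums : List Int) : Int :=
  (nums.foldl pvStepA (0, true)).1

-- ===== PORT B =====
-- slices nums[:i], nums[i+1:] with nonnegative indices are exactly take/drop;
-- Python list.index = List.idxOf (first occurrence)
def summer_69_alt (nums : List Int) : Int :=
  if (6 : Int) ∈ nums then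
    let i := nums.idxOf 6
    let rest := nums.drop (i + 1)
    if (9 : Int) ∈ rest then
      (nums.take i).sum + summer_69_alt (rest.drop (rest.idxOf 9 + 1))
    else
      (nums.take i).sum
  else
    nums.sum
termination_by nums.length
decreasing_by
  have h1 : nums.idxOf 6 < nums.length := List.idxOf_lt_length_of_mem (by assumption)
  simp [List.length_drop]
  omega

-- ===== PRECONDITION & SPEC =====
def Spec_summer_69 (nums : List Int) (out : Int) : Prop := out = summer_69_alt nums
instance (nums : List Int) (out : Int) : Decidable (Spec_summer_69 nums out) := by unfold Spec_summer_69; infer_instance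

-- ===== CLAIM (what is proved, stated in full; the proofs are below) =====
def Claim_equal_summer_69 : Prop := ∀ (nums : List Int), Dom_summer_69 nums → Spec_summer_69 nums (summer_69 nums)

-- ===== LEMMAS AND PROOFS =====

-- reference recursion: go true = adding mode, go false = skipping mode (after a 6, until a 9)
def pvGo (add : Bool) : List Int → Int
  | [] => 0
  | x :: xs =>
    if add then (if x = 6 then pvGo false xs else x + pvGo true xs)
    else (if x = 9 then pvGo true xs else pvGo false xs)

theorem foldA_eq_go (l : List Int) : ∀ (t : Int) (add : Bool),
    (l.foldl pvStepA (t, add)).1 = t + pvGo add l := by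
  induction l with
  | nil => intro t add; simp [pvGo]
  | cons x xs ih =>
    intro t add
    cases add with
    | true =>
      by_cases h6 : x = 6
      · subst h6; simp [pvStepA, pvGo, ih]
      · simp only [List.foldl_cons, pvStepA, pvGo, if_pos, if_neg h6]
        simp [h6, ih]; ring
    | false =>
      by_cases h9 : x = 9
      · subst h9; simp [pvStepA, pvGo, ih]
      · simp [pvStepA, pvGo, h9, ih]

theorem go_true_append (pre l : List Int) (h : (6 : Int) ∉ pre) :
    pvGo true (pre ++ l) = pre.sum + pvGo true l := by
  induction pre with
  | nil => simp
  | cons x xs ih =>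
    simp only [List.mem_cons, not_or] at h
    have hx : x ≠ 6 := fun hx => h.1 hx.symm
    simp [pvGo, hx, ih h.2]; ring

theorem go_false_append (pre l : List Int) (h : (9 : Int) ∉ pre) :
    pvGo false (pre ++ l) = pvGo false l := by
  induction pre with
  | nil => simp
  | cons x xs ih =>
    simp only [List.mem_cons, not_or] at h
    have hx : x ≠ 9 := fun hx => h.1 hx.symm
    simp [pvGo, hx, ih h.2]

theorem go_false_no9 (l : List Int) (h : (9 : Int) ∉ l) : pvGo false l = 0 := by
  simpa [pvGo] using go_false_append l [] h

theorem not_mem_take_idxOf (l : List Int) (a : Int) : a ∉ l.take (l.idxOf a) := by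
  induction l with
  | nil => simp
  | cons b xs ih =>
    by_cases h : b = a
    · simp [h]
    · simp [h, List.take_succ_cons, ih, Ne.symm h]

theorem split_at_idxOf (l : List Int) (a : Int) (h : a ∈ l) :
    l = l.take (l.idxOf a) ++ a :: l.drop (l.idxOf a + 1) := by
  have hlt : l.idxOf a < l.length := List.idxOf_lt_length_of_mem h
  have := (List.take_append_drop (l.idxOf a) l).symm
  rw [List.drop_eq_getElem_cons hlt, List.getElem_idxOf hlt] at this
  exact this

theorem go_true_split (l : List Int) (h : (6 : Int) ∈ l) :
    pvGo true l = (l.take (l.idxOf 6)).sum + pvGo false (l.drop (l.idxOf 6 + 1)) := by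
  conv_lhs => rw [split_at_idxOf l 6 h]
  rw [go_true_append _ _ (not_mem_take_idxOf l 6)]
  simp [pvGo]

theorem go_false_split (l : List Int) (h : (9 : Int) ∈ l) :
    pvGo false l = pvGo true (l.drop (l.idxOf 9 + 1)) := by
  conv_lhs => rw [split_at_idxOf l 9 h]
  rw [go_false_append _ _ (not_mem_take_idxOf l 9)]
  simp [pvGo]

theorem alt_eq_go (nums : List Int) : summer_69_alt nums = pvGo true nums := by
  fun_induction summer_69_alt with
  | case1 nums h6 i rest h9 ih =>
    rw [ih, go_true_split nums h6, go_false_split (nums.drop (nums.idxOf 6 + 1)) h9]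
  | case2 nums h6 i rest h9 =>
    rw [go_true_split nums h6, go_false_no9 (nums.drop (nums.idxOf 6 + 1)) h9]
    show (List.take (List.idxOf 6 nums) nums).sum = _
    simp
  | case3 nums h6 =>
    simpa [pvGo] using (go_true_append nums [] h6).symm

-- ===== VERDICT (by name: the statement is the Claim_ definition above) =====
theorem summer_69_spec : Claim_equal_summer_69 := by
  intro nums _
  unfold Spec_summer_69 summer_69
  rw [foldA_eq_go, alt_eq_go]
  simp
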